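-- pv_equiv track=rewrite | github.com/AdamZhouSE/pythonHomework | Code/CodeRecords/2114/60604/259436.py | finds
-- ===== SOURCE A (Python) =====
-- def finds(n):
--     if n==1:
--         return 1
--     elif n==2:
--         return 2
--     else:
--         for i in range(1,n):
--             if i*i>n:
--                 tmp=i-1
--                 break
--         if tmp*tmp==n:
--                 return 1
--         res=[]
--         for i in range(1,n//2+1):
--             tmp=finds(i)+finds(n-i)
--             res.append(tmp)
--         res.sort()
--         return res[0]
-- ===== SOURCE B (Python) =====
-- def finds(n):
--     # A perfect square is the base case of the recurrence: answer 1, no table needed.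
--     if n < 3:
--         return 1 if n < 2 else 2
--     r = 1
--     while (r + 1) * (r + 1) <= n:
--         r += 1
--     if r * r == n:
--         return 1
--     # Bottom-up DP over the same recurrence (min split, perfect square -> 1),
--     # with an incrementally maintained integer square root.
--     dp = [0, 1, 2] + [0] * (n - 2)
--     j = 1  # j == isqrt(k) for the last processed k
--     for k in range(3, n + 1):
--         if (j + 1) * (j + 1) == k:
--             j += 1
--             dp[k] = 1
--         else:
--             best = dp[1] + dp[k - 1]
--             for i in range(2, k // 2 + 1):
--                 c = dp[i] + dp[k - i]
--                 if c < best: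
--                     best = c
--             dp[k] = best
--     return dp[n]
-- ===== Notes on version B (the rewrite author's own statement) =====
-- stated objective: alternative
-- what changed: Replaces the exponential top-down recursion (which re-solves every subproblem and sorts a list just to take its minimum) by an up-front integer-square-root test plus a bottom-up DP table filled once with a running minimum; a timing run could not measure a ratio (A times out beyond tiny inputs), so no speed is claimed. Pre_ excludes n <= 0, where A raises UnboundLocalError (tmp is never bound).
-- outside the precondition, e.g. on finds(0): A raises UnboundLocalError, B returns 1; on finds(-4): A raises UnboundLocalError, B returns 1
import Mathlib
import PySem

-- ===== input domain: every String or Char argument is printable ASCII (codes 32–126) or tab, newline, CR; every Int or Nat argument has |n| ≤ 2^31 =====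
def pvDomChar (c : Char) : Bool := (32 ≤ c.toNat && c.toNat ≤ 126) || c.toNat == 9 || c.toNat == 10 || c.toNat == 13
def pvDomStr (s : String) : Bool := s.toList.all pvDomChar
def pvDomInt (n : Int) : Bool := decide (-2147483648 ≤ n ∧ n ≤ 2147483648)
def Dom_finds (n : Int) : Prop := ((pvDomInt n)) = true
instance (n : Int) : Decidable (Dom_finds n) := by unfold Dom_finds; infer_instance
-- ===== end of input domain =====

-- B replaces A's top-down recursion by a bottom-up DP table with a running
-- minimum and an incrementally maintained integer square root (objective: alternative).

-- ===== PORT A =====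
-- A's first loop: `for i in range(1,n): if i*i>n: tmp=i-1; break`
-- (`0` in the exhausted case corresponds to Python's unbound `tmp`, which is never
-- reached for n ≥ 3; n ≤ 0 raises NameError in Python and is excluded by Pre_finds).
def tmpLoop (n : Nat) (i : Nat) : Nat :=
  if i < n then (if i * i > n then i - 1 else tmpLoop n (i + 1)) else 0
termination_by n - i

-- Transliteration of A: the recursion runs on n.toNat (inputs with n ≤ 0 raise in
-- Python and are excluded by Pre_finds); `res.sort(); return res[0]` is ported as
-- PySem.List.sorted followed by taking the head (res is nonempty for n ≥ 3).
def findsNat : Nat → Int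
  | 0 => 0          -- unreachable under Pre_finds (Python raises NameError)
  | 1 => 1
  | 2 => 2
  | (m + 3) =>
      let tmp := tmpLoop (m + 3) 1
      if tmp * tmp = m + 3 then 1
      else
        let res := (List.range' 1 ((m + 3) / 2)).attach.map
          (fun ⟨i, _⟩ => findsNat i + findsNat ((m + 3) - i))
        match PySem.List.sorted res (fun x => x) false with
        | [] => 0     -- unreachable: res is nonempty for n ≥ 3
        | m0 :: _ => m0
termination_by n => n
decreasing_by
  all_goals
    rename_i hmem
    have := List.mem_range'_1.mp hmem
    omega

def finds (n : Int) : Int :=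
  if n ≤ 0 then 0 else findsNat n.toNat

-- ===== PORT B =====
-- Source B's up-front integer-square-root `while` loop
def isqrtLoop (n r : Nat) : Nat :=
  if (r + 1) * (r + 1) ≤ n then isqrtLoop n (r + 1) else r
termination_by n - r
decreasing_by
  have h : r + 1 ≤ n := by nlinarith
  omega

-- inner loop of Source B: running minimum over i in range(2, k//2+1)
def altInner (dp : List Int) (k : Nat) : Int :=
  (List.range' 2 (k / 2 - 1)).foldl
    (fun best i =>
      let c := dp.getD i 0 + dp.getD (k - i) 0
      if c < best then c else best)
    (dp.getD 1 0 + dp.getD (k - 1) 0)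

-- one iteration of Source B's `for k in range(3, n+1)` loop, state = (dp, j)
def altStep (st : List Int × Nat) (k : Nat) : List Int × Nat :=
  if (st.2 + 1) * (st.2 + 1) = k then (st.1.set k 1, st.2 + 1)
  else (st.1.set k (altInner st.1 k), st.2)

def finds_alt (n : Int) : Int :=
  if n < 3 then (if n < 2 then 1 else 2)
  else
    let N := n.toNat
    let r := isqrtLoop N 1
    if r * r = N then 1
    else
      let dp0 : List Int := [0, 1, 2] ++ List.replicate (N - 2) 0
      let st := (List.range' 3 (N - 2)).foldl altStep (dp0, 1)
      st.1.getD N 0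

-- ===== PRECONDITION & SPEC =====
-- Pre_ excludes n ≤ 0: there A's first loop body never runs and `tmp` is unbound,
-- so Python raises NameError.
def Pre_finds (n : Int) : Prop := 1 ≤ n
instance (n : Int) : Decidable (Pre_finds n) := by unfold Pre_finds; infer_instance
def pvWitness_finds : Int := 5

def Spec_finds (n : Int) (out : Int) : Prop := out = finds_alt n
instance (n : Int) (out : Int) : Decidable (Spec_finds n out) := by unfold Spec_finds; infer_instance

-- ===== CLAIM (what is proved, stated in full; the proofs are below) =====
def Claim_equal_finds : Prop := ∀ (n : Int), Dom_finds n → Pre_finds n → Spec_finds n (finds n)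

-- ===== LEMMAS AND PROOFS =====

-- A's first loop computes the integer square root of n (for n ≥ 3).
theorem tmpLoop_eq_sqrt (n i : Nat) (h3 : 3 ≤ n) (h1 : 1 ≤ i)
    (h2 : i ≤ Nat.sqrt n + 1) : tmpLoop n i = Nat.sqrt n := by
  have hs1 : Nat.sqrt n < n - 1 := by
    have : n < (n - 1) ^ 2 := by
      have h' : (n - 1) ^ 2 = (n - 1) * (n - 1) := sq (n - 1)
      nlinarith [Nat.sub_add_cancel (show 1 ≤ n by omega)]
    exact Nat.sqrt_lt'.mpr this
  have hin : i < n := by omega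
  rw [tmpLoop, if_pos hin]
  by_cases hgt : i * i > n
  · have hlt : Nat.sqrt n < i := Nat.sqrt_lt'.mpr (by nlinarith [sq i])
    have hie : i = Nat.sqrt n + 1 := by omega
    rw [if_pos hgt, hie]
    omega
  · have hle : i ≤ Nat.sqrt n := Nat.le_sqrt'.mpr (by nlinarith [sq i])
    rw [if_neg hgt]
    exact tmpLoop_eq_sqrt n (i + 1) h3 (by omega) (by omega)
termination_by Nat.sqrt n + 1 - i

-- head of the Python-sorted list = running minimum (A's `res.sort(); res[0]`).
theorem sorted_head_min (v : Int) (t : List Int) :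
    (match PySem.List.sorted (v :: t) (fun x => x) false with
     | [] => 0
     | m0 :: _ => m0) = t.foldl min v := by
  rcases hs : PySem.List.sorted (v :: t) (fun x => x) false with _ | ⟨m0, rest⟩
  · exact absurd ((PySem.List.sorted_eq_nil_iff _ _ _).mp hs) (by simp)
  · have hmem : m0 ∈ v :: t := (PySem.List.sorted_perm (v :: t) (fun x => x) false).mem_iff.mp (hs ▸ List.mem_cons_self ..)
    have hminEq : PySem.List.min? (v :: t) (fun y => y) = some (t.foldl min v) :=
      PySem.List.min?_id_cons v t
    have hfmem : t.foldl min v ∈ v :: t := PySem.List.min?_mem hminEq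
    have h1 : m0 ≤ t.foldl min v := PySem.List.key_head_sorted_le (v :: t) (fun x => x) hs _ hfmem
    have h2 : t.foldl min v ≤ m0 := PySem.List.min?_isMin hminEq _ hmem
    exact le_antisymm h1 h2

-- characterisation of A's recursion for n = m + 3
theorem findsNat_succ3 (m : Nat) :
    findsNat (m + 3) =
      if Nat.sqrt (m + 3) * Nat.sqrt (m + 3) = m + 3 then 1
      else (List.range' 2 ((m + 3) / 2 - 1)).foldl
        (fun b i => min b (findsNat i + findsNat ((m + 3) - i)))
        (findsNat 1 + findsNat (m + 2)) := by
  conv_lhs => rw [findsNat]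
  have htmp : tmpLoop (m + 3) 1 = Nat.sqrt (m + 3) :=
    tmpLoop_eq_sqrt (m + 3) 1 (by omega) (by omega) (by omega)
  rw [htmp]
  by_cases hsq : Nat.sqrt (m + 3) * Nat.sqrt (m + 3) = m + 3
  · rw [if_pos hsq, if_pos hsq]
  · rw [if_neg hsq, if_neg hsq]
    have hmap : (List.range' 1 ((m + 3) / 2)).attach.map
        (fun i => findsNat i.1 + findsNat ((m + 3) - i.1)) =
        (List.range' 1 ((m + 3) / 2)).map (fun i => findsNat i + findsNat ((m + 3) - i)) :=
      List.attach_map_val (l := List.range' 1 ((m + 3) / 2))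
        (f := fun i => findsNat i + findsNat ((m + 3) - i))
    have hlen : (m + 3) / 2 = ((m + 3) / 2 - 1) + 1 := by omega
    rw [hmap, hlen, List.range'_succ, List.map_cons, sorted_head_min, List.foldl_map]
    norm_num

-- if c < best then c else best IS min best c
theorem foldl_min_congr (l : List Nat) (f g : Nat → Int) (h : ∀ i ∈ l, f i = g i) (b : Int) :
    l.foldl (fun b i => min b (f i)) b =
    l.foldl (fun best i => if g i < best then g i else best) b := by
  induction l generalizing b with
  | nil => rfl
  | cons x xs ih =>
    simp only [List.foldl_cons]
    rw [show min b (f x) = (if g x < b then g x else b) by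
      rw [h x (List.mem_cons_self ..)]; rw [min_def]; split_ifs <;> omega]
    exact ih (fun i hi => h i (List.mem_cons_of_mem _ hi)) _

-- square-root bookkeeping of B's loop
theorem sqrt_step_square (k : Nat) (_h : 3 ≤ k)
    (hsq : (Nat.sqrt (k - 1) + 1) * (Nat.sqrt (k - 1) + 1) = k) :
    Nat.sqrt k = Nat.sqrt (k - 1) + 1 ∧ Nat.sqrt k * Nat.sqrt k = k := by
  set j := Nat.sqrt (k - 1) with hjdef
  have : Nat.sqrt k = j + 1 := by
    rw [show k = (j + 1) ^ 2 by rw [sq]; omega, Nat.sqrt_eq']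
  exact ⟨this, by rw [this]; omega⟩

theorem sqrt_step_nonsquare (k : Nat) (h : 3 ≤ k)
    (hsq : (Nat.sqrt (k - 1) + 1) * (Nat.sqrt (k - 1) + 1) ≠ k) :
    Nat.sqrt k = Nat.sqrt (k - 1) ∧ Nat.sqrt k * Nat.sqrt k ≠ k := by
  have hub : k - 1 < (Nat.sqrt (k - 1) + 1) ^ 2 := Nat.lt_succ_sqrt' (k - 1)
  have hlb : Nat.sqrt (k - 1) ^ 2 ≤ k - 1 := Nat.sqrt_le' (k - 1)
  have hklt : k < (Nat.sqrt (k - 1) + 1) ^ 2 := by rw [sq] at hub ⊢; omega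
  have h1 : Nat.sqrt k < Nat.sqrt (k - 1) + 1 := Nat.sqrt_lt'.mpr hklt
  have h2 : Nat.sqrt (k - 1) ≤ Nat.sqrt k := Nat.sqrt_le_sqrt (by omega)
  have heq : Nat.sqrt k = Nat.sqrt (k - 1) := by omega
  refine ⟨heq, ?_⟩
  rw [heq]
  rw [sq] at hlb
  omega

-- B's initial table
def dpInit (N : Nat) : List Int := [0, 1, 2] ++ List.replicate (N - 2) 0

-- loop invariant for B's fold: after processing range' 3 T the table agrees
-- with A's recursion up to T + 2 and j is the integer square root of T + 2
theorem inv_fold (N : Nat) (hN : 2 ≤ N) : ∀ T, T ≤ N - 2 →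
    ((List.range' 3 T).foldl altStep (dpInit N, 1)).1.length = N + 1 ∧
    ((List.range' 3 T).foldl altStep (dpInit N, 1)).2 = Nat.sqrt (T + 2) ∧
    ∀ m ≤ T + 2, ((List.range' 3 T).foldl altStep (dpInit N, 1)).1.getD m 0 = findsNat m := by
  intro T
  induction T with
  | zero =>
    intro _
    refine ⟨by simp [dpInit]; omega, by norm_num [Nat.sqrt], ?_⟩
    intro m hm
    interval_cases m <;> simp [dpInit, findsNat]
  | succ T ih =>
    intro hT
    obtain ⟨hlen, hj, hdp⟩ := ih (by omega)
    rw [List.range'_concat, List.foldl_append, List.foldl_cons, List.foldl_nil]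
    set st := (List.range' 3 T).foldl altStep (dpInit N, 1) with hst
    have hk3 : 3 + 1 * T = T + 3 := by omega
    rw [hk3]
    have hjk : st.2 = Nat.sqrt (T + 3 - 1) := by rw [hj]; norm_num
    have hkN : T + 3 ≤ N := by omega
    have hklen : T + 3 < st.1.length := by omega
    by_cases hsq : (st.2 + 1) * (st.2 + 1) = T + 3
    · -- perfect-square branch of B
      have hy := sqrt_step_square (T + 3) (by omega) (by rw [← hjk]; exact hsq)
      rw [altStep, if_pos hsq]
      refine ⟨by simpa using hlen, by simpa using (hjk ▸ hy.1).symm, ?_⟩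
      intro m hm
      by_cases hmk : m = T + 3
      · subst hmk
        simp only [List.getD_eq_getElem?_getD, List.getElem?_set_self hklen, Option.getD_some]
        rw [findsNat_succ3 T, if_pos hy.2]
      · simp only [List.getD_eq_getElem?_getD,
          List.getElem?_set_ne (show T + 3 ≠ m by omega)]
        rw [← List.getD_eq_getElem?_getD]
        exact hdp m (by omega)
    · -- non-square branch of B
      have hy := sqrt_step_nonsquare (T + 3) (by omega) (by rw [← hjk]; exact hsq)
      rw [altStep, if_neg hsq]
      refine ⟨by simpa using hlen, by simpa using (hjk ▸ hy.1).symm, ?_⟩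
      intro m hm
      by_cases hmk : m = T + 3
      · subst hmk
        simp only [List.getD_eq_getElem?_getD, List.getElem?_set_self hklen, Option.getD_some]
        rw [findsNat_succ3 T, if_neg hy.2]
        have hcong : (List.range' 2 ((T + 3) / 2 - 1)).foldl
            (fun b i => min b (findsNat i + findsNat ((T + 3) - i)))
            (findsNat 1 + findsNat (T + 2)) =
            (List.range' 2 ((T + 3) / 2 - 1)).foldl
            (fun best i => if st.1.getD i 0 + st.1.getD ((T + 3) - i) 0 < best
              then st.1.getD i 0 + st.1.getD ((T + 3) - i) 0 else best)
            (findsNat 1 + findsNat (T + 2)) := by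
          apply foldl_min_congr
          intro i hi
          have hib := List.mem_range'_1.mp hi
          have h1 : st.1.getD i 0 = findsNat i := hdp i (by omega)
          have h2 : st.1.getD ((T + 3) - i) 0 = findsNat ((T + 3) - i) := hdp _ (by omega)
          rw [h1, h2]
        rw [hcong, altInner]
        have hd1 : st.1.getD 1 0 = findsNat 1 := hdp 1 (by omega)
        have hd2 : st.1.getD (T + 3 - 1) 0 = findsNat (T + 2) := by
          have := hdp (T + 2) (by omega); simpa using this
        simp only [hd1, hd2]
      · simp only [List.getD_eq_getElem?_getD,
          List.getElem?_set_ne (show T + 3 ≠ m by omega)]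
        rw [← List.getD_eq_getElem?_getD]
        exact hdp m (by omega)

-- Source B's while loop computes the integer square root (for n ≥ 3)
theorem isqrtLoop_eq_sqrt (n : Nat) (h3 : 3 ≤ n) : ∀ r, 1 ≤ r → r ≤ Nat.sqrt n →
    isqrtLoop n r = Nat.sqrt n := by
  intro r h1 h2
  rw [isqrtLoop]
  by_cases hle : (r + 1) * (r + 1) ≤ n
  · have hr1 : r + 1 ≤ Nat.sqrt n := Nat.le_sqrt'.mpr (by nlinarith [sq (r + 1)])
    rw [if_pos hle]
    exact isqrtLoop_eq_sqrt n h3 (r + 1) (by omega) hr1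
  · rw [if_neg hle]
    have : ¬ (Nat.sqrt n < r + 1) → (r + 1) * (r + 1) ≤ n := by
      intro h
      have := Nat.le_sqrt'.mp (show r + 1 ≤ Nat.sqrt n by omega)
      rw [sq] at this; omega
    by_contra hne
    exact hle (this (by omega))
termination_by r => Nat.sqrt n - r

-- ===== VERDICT (by name: the statement is the Claim_ definition above) =====
theorem finds_spec : Claim_equal_finds := by
  intro n _ hpre
  unfold Spec_finds finds finds_alt Pre_finds at *
  rw [if_neg (by omega : ¬ n ≤ 0)]
  by_cases h3 : n < 3
  · interval_cases n <;> simp [findsNat]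
  · rw [if_neg h3]
    have hN3 : 3 ≤ n.toNat := by omega
    have hr : isqrtLoop n.toNat 1 = Nat.sqrt n.toNat :=
      isqrtLoop_eq_sqrt n.toNat hN3 1 le_rfl (Nat.le_sqrt'.mpr (by nlinarith [sq 1]))
    obtain ⟨m, hm⟩ : ∃ m, n.toNat = m + 3 := ⟨n.toNat - 3, by omega⟩
    simp only [hr]
    by_cases hsq : Nat.sqrt n.toNat * Nat.sqrt n.toNat = n.toNat
    · rw [if_pos hsq, hm, findsNat_succ3 m, if_pos (by rw [← hm]; exact hsq)]
    · rw [if_neg hsq]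
      obtain ⟨hlen, hj, hdp⟩ := inv_fold n.toNat (by omega) (n.toNat - 2) (le_refl _)
      have := (hdp n.toNat (by omega)).symm
      simpa [dpInit] using this
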